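-- pv_equiv track=rewrite | github.com/ShiroNakayama/Python_100Knocks | chapter9/ex83.py | count_co_occurrence_num
-- ===== SOURCE A (Python) =====
-- def count_co_occurrence_num(contexts, n, word_occurrence_num, context_word_occurrence_num):
--     co_occurrence_num = dict()
--     for pair in contexts:
--         word, context_word = pair.split("\t")
--
--         co_occurrence = f"{word}\t{context_word}"
--         if co_occurrence in co_occurrence_num:
--             co_occurrence_num[co_occurrence] += 1
--         else:
--             # メモリ節約のため、f(t,∗)とf(∗,c)が共に規定回数以下(=辞書から除外されていた)ならf(t,c)は無視する
--             if word in word_occurrence_num or context_word in context_word_occurrence_num: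
--                 co_occurrence_num[co_occurrence] = 1
--
--     # メモリ節約のため、出現回数がn回に満たないデータは削除する
--     del_list = []
--     for k, v in co_occurrence_num.items():
--         if v < n:
--             del_list += [k]
--     for w in del_list:
--         del co_occurrence_num[w]
--
--     return co_occurrence_num
-- ===== SOURCE B (Python) =====
-- def count_co_occurrence_num(contexts, n, word_occurrence_num, context_word_occurrence_num):
--     co_occurrence_num = {}
--     for pair in dict.fromkeys(contexts):  # distinct pairs, first-occurrence order
--         word, context_word = pair.split("\t")
--         c = contexts.count(pair)
--         if (word in word_occurrence_num or context_word in context_word_occurrence_num) and c >= n: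
--             co_occurrence_num[pair] = c
--     return co_occurrence_num
-- ===== Notes on version B (the rewrite author's own statement) =====
-- stated objective: simpler
-- what changed: A maintains a running co-occurrence dict with a membership gate at insertion and then prunes it with a collect-then-delete pass; B keeps no running counts at all: it iterates the distinct pairs (dict.fromkeys) and, for each, computes its total by a direct contexts.count scan, admitting it into the result in one step.
import Mathlib
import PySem

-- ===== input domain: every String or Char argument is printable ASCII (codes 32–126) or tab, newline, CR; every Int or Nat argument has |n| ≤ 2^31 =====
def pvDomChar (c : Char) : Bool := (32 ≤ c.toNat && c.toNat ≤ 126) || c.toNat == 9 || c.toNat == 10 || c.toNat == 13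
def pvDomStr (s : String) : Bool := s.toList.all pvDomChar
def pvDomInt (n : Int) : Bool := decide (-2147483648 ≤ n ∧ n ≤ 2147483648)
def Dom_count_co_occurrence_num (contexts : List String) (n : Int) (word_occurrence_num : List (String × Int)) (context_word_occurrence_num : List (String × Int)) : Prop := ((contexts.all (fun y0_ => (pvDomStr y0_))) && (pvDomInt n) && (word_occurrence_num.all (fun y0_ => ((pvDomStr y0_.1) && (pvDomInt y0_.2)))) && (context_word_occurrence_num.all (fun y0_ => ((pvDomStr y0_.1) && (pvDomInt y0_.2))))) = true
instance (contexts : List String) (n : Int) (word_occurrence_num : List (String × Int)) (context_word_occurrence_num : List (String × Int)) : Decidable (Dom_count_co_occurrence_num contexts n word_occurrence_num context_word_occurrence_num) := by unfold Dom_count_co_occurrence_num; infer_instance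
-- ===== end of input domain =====

-- B keeps no running counts: it iterates the DISTINCT pairs (dict.fromkeys) and counts each one
-- by a direct contexts.count scan; A maintains a gated counting dict plus a collect-then-delete
-- pruning pass (objective: simpler).

-- ===== PORT A =====
-- body of A's `for pair in contexts` loop (the `| _ => d` arm is where Python's unpacking raises; Pre_ excludes it)
def pvStepA (word_occurrence_num context_word_occurrence_num : List (String × Int))
    (d : PySem.Dict String Int) (pair : String) : PySem.Dict String Int :=
  match (PySem.Str.split? pair "\t").getD [] with
  | [word, context_word] =>
    let co_occurrence := PySem.Str.join "\t" [word, context_word]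
    if d.contains co_occurrence then
      d.insert co_occurrence (d.getD co_occurrence 0 + 1)
    else if word_occurrence_num.any (fun q => q.1 == word)
         || context_word_occurrence_num.any (fun q => q.1 == context_word) then
      d.insert co_occurrence 1
    else d
  | _ => d

def count_co_occurrence_num (contexts : List String) (n : Int) (word_occurrence_num : List (String × Int)) (context_word_occurrence_num : List (String × Int)) : List (String × Int) :=
  let co_occurrence_num := contexts.foldl (pvStepA word_occurrence_num context_word_occurrence_num) PySem.Dict.empty
  let del_list := co_occurrence_num.items.foldl
    (fun acc kv => if decide (kv.2 < n) = true then acc ++ [kv.1] else acc) ([] : List String)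
  (del_list.foldl (fun d w => d.erase w) co_occurrence_num).items

-- ===== PORT B =====
-- body of B's loop over the distinct pairs: split, scan-count, admit in one step
def pvStepB (contexts : List String) (n : Int)
    (word_occurrence_num context_word_occurrence_num : List (String × Int))
    (r : PySem.Dict String Int) (pair : String) : PySem.Dict String Int :=
  match (PySem.Str.split? pair "\t").getD [] with
  | [word, context_word] =>
    let c : Int := (contexts.count pair : Int)
    if (word_occurrence_num.any (fun q => q.1 == word)
        || context_word_occurrence_num.any (fun q => q.1 == context_word))
       && decide (n ≤ c) then
      r.insert pair c
    else r
  | _ => r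

def count_co_occurrence_num_alt (contexts : List String) (n : Int) (word_occurrence_num : List (String × Int)) (context_word_occurrence_num : List (String × Int)) : List (String × Int) :=
  ((PySem.List.dedup contexts).foldl
    (pvStepB contexts n word_occurrence_num context_word_occurrence_num)
    PySem.Dict.empty).items

-- ===== PRECONDITION & SPEC =====
-- Pre_ excludes contexts entries that do not contain exactly one tab: there Python's
-- `word, context_word = pair.split("\t")` raises ValueError in both A and B.
def Pre_count_co_occurrence_num (contexts : List String) (n : Int) (word_occurrence_num : List (String × Int)) (context_word_occurrence_num : List (String × Int)) : Prop :=
  ∀ pair ∈ contexts, ((PySem.Str.split? pair "\t").getD []).length = 2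

instance (contexts : List String) (n : Int) (word_occurrence_num : List (String × Int)) (context_word_occurrence_num : List (String × Int)) : Decidable (Pre_count_co_occurrence_num contexts n word_occurrence_num context_word_occurrence_num) := by unfold Pre_count_co_occurrence_num; infer_instance

def pvWitness_count_co_occurrence_num : List String × Int × (List (String × Int)) × (List (String × Int)) :=
  (["cat\tsat", "cat\tsat", "dog\tran"], 2, [("cat", 5)], [("ran", 3)])

def Spec_count_co_occurrence_num (contexts : List String) (n : Int) (word_occurrence_num : List (String × Int)) (context_word_occurrence_num : List (String × Int)) (out : List (String × Int)) : Prop := out = count_co_occurrence_num_alt contexts n word_occurrence_num context_word_occurrence_num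
instance (contexts : List String) (n : Int) (word_occurrence_num : List (String × Int)) (context_word_occurrence_num : List (String × Int)) (out : List (String × Int)) : Decidable (Spec_count_co_occurrence_num contexts n word_occurrence_num context_word_occurrence_num out) := by unfold Spec_count_co_occurrence_num; infer_instance

-- ===== CLAIM (what is proved, stated in full; the proofs are below) =====
def Claim_equal_count_co_occurrence_num : Prop := ∀ (contexts : List String) (n : Int) (word_occurrence_num : List (String × Int)) (context_word_occurrence_num : List (String × Int)), Dom_count_co_occurrence_num contexts n word_occurrence_num context_word_occurrence_num → Pre_count_co_occurrence_num contexts n word_occurrence_num context_word_occurrence_num → Spec_count_co_occurrence_num contexts n word_occurrence_num context_word_occurrence_num (count_co_occurrence_num contexts n word_occurrence_num context_word_occurrence_num)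

-- ===== LEMMAS AND PROOFS =====

-- admissibility of a co-occurrence key (proof-only helper)
def pvAdmKey (word_occurrence_num context_word_occurrence_num : List (String × Int)) (key : String) : Bool :=
  match (PySem.Str.split? key "\t").getD [] with
  | [word, context_word] =>
      word_occurrence_num.any (fun q => q.1 == word)
      || context_word_occurrence_num.any (fun q => q.1 == context_word)
  | _ => false

-- splitOn.go with accumulator
lemma pv_go_acc (sep : List Char) : ∀ (fuel : Nat) (l cur : List Char) (acc : List (List Char)),
    PySem.Chars.splitOn.go sep fuel l cur acc
      = acc.reverse ++ PySem.Chars.splitOn.go sep fuel l cur [] := by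
  intro fuel
  induction fuel with
  | zero => intro l cur acc; simp [PySem.Chars.splitOn.go]
  | succ fuel ih =>
    intro l cur acc
    cases l with
    | nil => simp [PySem.Chars.splitOn.go]
    | cons c rest =>
      simp only [PySem.Chars.splitOn.go]
      split_ifs with h
      · rw [ih _ _ (cur.reverse :: acc), ih _ _ (cur.reverse :: [])]
        simp
      · rw [ih _ _ acc]

lemma pv_go_ne_nil (sep : List Char) : ∀ (fuel : Nat) (l cur : List Char) (acc : List (List Char)),
    PySem.Chars.splitOn.go sep fuel l cur acc ≠ [] := by
  intro fuel
  induction fuel with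
  | zero => intro l cur acc; simp [PySem.Chars.splitOn.go]
  | succ fuel ih =>
    intro l cur acc
    cases l with
    | nil => simp [PySem.Chars.splitOn.go]
    | cons c rest =>
      simp only [PySem.Chars.splitOn.go]
      split_ifs with h
      · exact ih _ _ _
      · exact ih _ _ _

lemma pv_go_join (sep : List Char) (hsep : sep ≠ []) :
    ∀ (fuel : Nat) (l cur : List Char), l.length ≤ fuel →
    PySem.Chars.join sep (PySem.Chars.splitOn.go sep fuel l cur []) = cur.reverse ++ l := by
  intro fuel
  induction fuel with
  | zero =>
    intro l cur hl
    have : l = [] := List.length_eq_zero_iff.mp (Nat.le_zero.mp hl)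
    subst this
    simp [PySem.Chars.splitOn.go, PySem.Chars.join_singleton]
  | succ fuel ih =>
    intro l cur hl
    cases l with
    | nil => simp [PySem.Chars.splitOn.go, PySem.Chars.join_singleton]
    | cons c rest =>
      simp only [PySem.Chars.splitOn.go]
      split_ifs with h
      · rw [pv_go_acc]
        obtain ⟨t0, ts, ht⟩ :=
          List.exists_cons_of_ne_nil (pv_go_ne_nil sep fuel (List.drop sep.length (c :: rest)) [] [])
        have hlen : (List.drop sep.length (c :: rest)).length ≤ fuel := by
          have hsp : 1 ≤ sep.length := List.length_pos_iff.mpr hsep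
          simp only [List.length_drop, List.length_cons] at *
          omega
        have hrec := ih (List.drop sep.length (c :: rest)) [] hlen
        rw [ht] at hrec ⊢
        simp only [List.reverse_nil, List.reverse_cons, List.nil_append] at hrec ⊢
        rw [List.singleton_append, PySem.Chars.join_cons_cons, hrec]
        have hpre : sep <+: (c :: rest) := List.isPrefixOf_iff_prefix.mp h
        obtain ⟨tail, htail⟩ := hpre
        have hdrop : List.drop sep.length (c :: rest) = tail := by
          rw [← htail]; simp
        rw [hdrop, ← htail]
        simp
      · have hrec := ih rest (c :: cur) (by simpa using Nat.le_of_succ_le_succ hl)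
        rw [hrec]
        simp

lemma pv_splitOn_join (s sep : List Char) (hsep : sep ≠ []) :
    PySem.Chars.join sep (PySem.Chars.splitOn s sep) = s := by
  unfold PySem.Chars.splitOn
  simpa using pv_go_join sep hsep (s.length + 1) s [] (Nat.le_succ _)

-- the co-occurrence key rebuilt from the two split parts is the original pair
lemma pv_key_eq (p w c : String) (hp : (PySem.Str.split? p "\t").getD [] = [w, c]) :
    PySem.Str.join "\t" [w, c] = p := by
  have htl : ("\t" : String).toList = ['\t'] := by decide
  simp only [PySem.Str.split?, PySem.Chars.split?, htl] at hp
  simp only [List.isEmpty_cons, Bool.false_eq_true, if_false] at hp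
  rw [Option.map_some] at hp
  simp only [Option.getD_some] at hp
  obtain ⟨W, rest, hWrest, hwW, hrest⟩ := List.map_eq_cons_iff.mp hp
  obtain ⟨C, rest2, hCrest, hcC, hrest2⟩ := List.map_eq_cons_iff.mp hrest
  have hrest2nil : rest2 = [] := by simpa using congrArg List.length hrest2
  subst hrest2nil
  have hL : PySem.Chars.splitOn p.toList ['\t'] = [W, C] := by
    rw [hWrest, hCrest]
  have hj : PySem.Chars.join ['\t'] [W, C] = p.toList := by
    rw [← hL]; exact pv_splitOn_join _ _ (by decide)
  rw [← hwW, ← hcC]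
  simp only [PySem.Str.join, htl, List.map_cons, List.map_nil, String.toList_ofList, hj,
    String.ofList_toList]

lemma pv_admKey_eq (wo co : List (String × Int)) (p w c : String)
    (hp : (PySem.Str.split? p "\t").getD [] = [w, c]) :
    pvAdmKey wo co p = (wo.any (fun q => q.1 == w) || co.any (fun q => q.1 == c)) := by
  unfold pvAdmKey
  rw [hp]

-- contains on a dict whose items are a filter of another dict's items
lemma pv_contains_of_filter (dA dB : PySem.Dict String Int) (q : String × Int → Bool)
    (hq : ∀ kv : String × Int, q kv = q (kv.1, 0))
    (h : dA.items = dB.items.filter q) (k : String) :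
    dA.contains k = (dB.contains k && q (k, 0)) := by
  cases hc : q (k, 0) with
  | false =>
    simp only [Bool.and_false]
    by_contra hne
    have hck : dA.contains k = true := by
      cases h' : dA.contains k
      · exact absurd h' hne
      · rfl
    have hk := (PySem.Dict.contains_iff_mem_keys dA k).mp hck
    simp only [PySem.Dict.keys, h, List.mem_map, List.mem_filter] at hk
    obtain ⟨kv, ⟨_, hqkv⟩, hfst⟩ := hk
    rw [hq kv, hfst, hc] at hqkv
    exact absurd hqkv (by simp)
  | true =>
    simp only [Bool.and_true]
    cases hcb : dB.contains k with
    | false =>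
      by_contra hne
      have hck : dA.contains k = true := by
        cases h' : dA.contains k
        · exact absurd h' hne
        · rfl
      have hk := (PySem.Dict.contains_iff_mem_keys dA k).mp hck
      simp only [PySem.Dict.keys, h, List.mem_map, List.mem_filter] at hk
      obtain ⟨kv, ⟨hmem, _⟩, hfst⟩ := hk
      have : dB.contains k = true := by
        rw [PySem.Dict.contains_iff_mem_keys]
        rw [← hfst]
        exact PySem.Dict.mem_keys_of_mem_items dB hmem
      rw [this] at hcb; exact absurd hcb (by simp)
    | true =>
      have hk := (PySem.Dict.contains_iff_mem_keys dB k).mp hcb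
      simp only [PySem.Dict.keys, List.mem_map] at hk
      obtain ⟨kv, hmem, hfst⟩ := hk
      rw [PySem.Dict.contains_iff_mem_keys]
      simp only [PySem.Dict.keys, h, List.mem_map, List.mem_filter]
      exact ⟨kv, ⟨hmem, by rw [hq kv, hfst, hc]⟩, hfst⟩

lemma pv_nodup_of_filter (dA dB : PySem.Dict String Int) (q : String × Int → Bool)
    (h : dA.items = dB.items.filter q) (hnd : dB.keys.Nodup) : dA.keys.Nodup := by
  have : dA.keys.Sublist dB.keys := by
    simp only [PySem.Dict.keys, h]
    exact List.filter_sublist.map _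
  exact hnd.sublist this

-- one-step invariant: A's gated step vs the unconditional counting step ('d[p] = d.get(p,0)+1')
lemma pv_step_inv (wo co : List (String × Int)) (dA dB : PySem.Dict String Int)
    (p w c : String)
    (hp : (PySem.Str.split? p "\t").getD [] = [w, c])
    (hnd : dB.keys.Nodup)
    (h1 : dA.items = dB.items.filter (fun kv => pvAdmKey wo co kv.1)) :
    (pvStepA wo co dA p).items
        = (dB.insert p (dB.getD p 0 + 1)).items.filter (fun kv => pvAdmKey wo co kv.1)
      ∧ (dB.insert p (dB.getD p 0 + 1)).keys.Nodup := by
  have hkey : PySem.Str.join "\t" [w, c] = p := pv_key_eq p w c hp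
  have hadm : pvAdmKey wo co p = (wo.any (fun q => q.1 == w) || co.any (fun q => q.1 == c)) :=
    pv_admKey_eq wo co p w c hp
  have hq : ∀ kv : String × Int, (fun kv : String × Int => pvAdmKey wo co kv.1) kv
      = (fun kv : String × Int => pvAdmKey wo co kv.1) (kv.1, 0) := fun kv => rfl
  have hcont : ∀ k, dA.contains k = (dB.contains k && pvAdmKey wo co k) := by
    intro k
    exact pv_contains_of_filter dA dB _ hq h1 k
  have hndA : dA.keys.Nodup := pv_nodup_of_filter dA dB _ h1 hnd
  simp only [pvStepA, hp, hkey]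
  refine ⟨?_, PySem.Dict.nodup_keys_insert dB p _ hnd⟩
  cases ha : (wo.any (fun q => q.1 == w) || co.any (fun q => q.1 == c)) with
  | true =>
    have hadm' : pvAdmKey wo co p = true := by rw [hadm, ha]
    cases hcb : dB.contains p with
    | true =>
      have hcA : dA.contains p = true := by simp [hcont, hcb, hadm']
      have hvd : dA.getD p 0 = dB.getD p 0 := by
        obtain ⟨kv, hmem, hfst⟩ := by
          have := (PySem.Dict.contains_iff_mem_keys dB p).mp hcb
          simpa only [PySem.Dict.keys, List.mem_map] using this
        obtain ⟨k0, v0⟩ := kv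
        simp only at hfst
        subst hfst
        have hmemA : (k0, v0) ∈ dA.items := by
          rw [h1, List.mem_filter]
          exact ⟨hmem, by simpa using hadm'⟩
        rw [PySem.Dict.getD_of_mem_items dA hmemA hndA 0,
            PySem.Dict.getD_of_mem_items dB hmem hnd 0]
      rw [hcA]
      simp only [reduceIte]
      rw [PySem.Dict.items_insert_of_contains dA _ hcA,
          PySem.Dict.items_insert_of_contains dB _ hcb, List.filter_map, h1, hvd]
      congr 1
      apply List.filter_congr
      intro kv _
      simp only [Function.comp_apply]
      by_cases hk : kv.1 = p
      · simp [hk, hadm']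
      · simp [hk]
    | false =>
      have hcA : dA.contains p = false := by rw [hcont, hcb]; simp
      rw [hcA]
      simp only [Bool.false_eq_true, reduceIte]
      rw [PySem.Dict.items_insert_of_not_contains dA _ hcA,
          PySem.Dict.items_insert_of_not_contains dB _ hcb,
          PySem.Dict.getD_of_not_contains dB 0 hcb, List.filter_append, h1]
      simp [hadm']
  | false =>
    have hadm' : pvAdmKey wo co p = false := by rw [hadm, ha]
    have hcA : dA.contains p = false := by rw [hcont, hadm']; simp
    rw [hcA]
    simp only [Bool.false_eq_true, reduceIte]
    cases hcb : dB.contains p with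
    | true =>
      rw [PySem.Dict.items_insert_of_contains dB _ hcb, List.filter_map, h1]
      rw [show (fun kv : String × Int => pvAdmKey wo co kv.1) ∘
            (fun q : String × Int => if (q.1 == p) = true then (p, dB.getD p 0 + 1) else q)
          = fun kv : String × Int => pvAdmKey wo co kv.1 from ?_]
      · have hid : ∀ kv ∈ List.filter (fun kv : String × Int => pvAdmKey wo co kv.1) dB.items,
            (fun q : String × Int => if (q.1 == p) = true then (p, dB.getD p 0 + 1) else q) kv
              = id kv := by
          intro kv hkv
          rw [List.mem_filter] at hkv
          have hne : kv.1 ≠ p := by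
            intro hk
            rw [hk] at hkv
            rw [hadm'] at hkv
            exact absurd hkv.2 (by simp)
          simp [hne]
        rw [List.map_congr_left hid, List.map_id]
      · funext kv
        simp only [Function.comp_apply]
        by_cases hk : kv.1 = p
        · simp [hk, hadm']
        · simp [hk]
    | false =>
      rw [PySem.Dict.items_insert_of_not_contains dB _ hcb, List.filter_append, h1]
      simp [hadm']

-- loop invariant: A's counting loop is the admissibility-filter of the unconditional counter loop
lemma pv_loop_inv (wo co : List (String × Int)) :
    ∀ (l : List String) (dA dB : PySem.Dict String Int),
    (∀ p ∈ l, ((PySem.Str.split? p "\t").getD []).length = 2) →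
    dB.keys.Nodup →
    dA.items = dB.items.filter (fun kv => pvAdmKey wo co kv.1) →
    (l.foldl (pvStepA wo co) dA).items
        = (l.foldl (fun d x => d.insert x (d.getD x 0 + 1)) dB).items.filter
            (fun kv => pvAdmKey wo co kv.1)
      ∧ (l.foldl (fun d x => d.insert x (d.getD x 0 + 1)) dB).keys.Nodup := by
  intro l
  induction l with
  | nil => intro dA dB _ hnd h1; exact ⟨h1, hnd⟩
  | cons p l ih =>
    intro dA dB hpre hnd h1
    obtain ⟨w, c, hp⟩ := List.length_eq_two.mp (hpre p (List.mem_cons_self))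
    obtain ⟨g1, g2⟩ := pv_step_inv wo co dA dB p w c hp hnd h1
    simp only [List.foldl_cons]
    exact ih (pvStepA wo co dA p) (dB.insert p (dB.getD p 0 + 1))
      (fun q hq => hpre q (List.mem_cons_of_mem _ hq)) g2 g1

-- B's loop over a duplicate-free list of pairs builds exactly the filtered count table
lemma pv_b_items (contexts : List String) (n : Int) (wo co : List (String × Int)) :
    ∀ (ds : List String), ds.Nodup →
    (∀ p ∈ ds, ((PySem.Str.split? p "\t").getD []).length = 2) →
    (ds.foldl (pvStepB contexts n wo co) PySem.Dict.empty).items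
      = ((ds.map (fun k => (k, (contexts.count k : Int)))).filter
          (fun kv => pvAdmKey wo co kv.1)).filter (fun kv => decide (n ≤ kv.2)) := by
  intro ds
  induction ds using List.reverseRecOn with
  | nil => intro _ _; simp [PySem.Dict.empty]
  | append_singleton ds p ih =>
    intro hnd hpre
    have hndds : ds.Nodup := hnd.sublist (List.sublist_append_left _ _)
    have hpds : p ∉ ds := by
      have := List.nodup_append.mp hnd
      intro hmem
      exact this.2.2 p hmem p (by simp) rfl
    have hpreds : ∀ q ∈ ds, ((PySem.Str.split? q "\t").getD []).length = 2 :=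
      fun q hq => hpre q (List.mem_append_left _ hq)
    obtain ⟨w, c, hp⟩ := List.length_eq_two.mp (hpre p (List.mem_append_right _ (by simp)))
    have hIH := ih hndds hpreds
    set r := ds.foldl (pvStepB contexts n wo co) PySem.Dict.empty with hr
    have hcontains : r.contains p = false := by
      by_contra hne
      have hck : r.contains p = true := by
        cases h' : r.contains p
        · exact absurd h' hne
        · rfl
      have hk := (PySem.Dict.contains_iff_mem_keys r p).mp hck
      simp only [PySem.Dict.keys, hIH, List.mem_map, List.mem_filter] at hk
      obtain ⟨kv, ⟨⟨hkv, _⟩, _⟩, hfst⟩ := hk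
      obtain ⟨k0, hk0, hk0e⟩ := hkv
      have : k0 = p := by
        have := congrArg Prod.fst hk0e
        simpa [hfst] using this
      exact hpds (this ▸ hk0)
    rw [List.foldl_append, List.foldl_cons, List.foldl_nil]
    simp only [pvStepB, hp]
    have hadm : pvAdmKey wo co p = (wo.any (fun q => q.1 == w) || co.any (fun q => q.1 == c)) :=
      pv_admKey_eq wo co p w c hp
    rw [List.map_append, List.filter_append, List.filter_append]
    cases hc : (wo.any (fun q => q.1 == w) || co.any (fun q => q.1 == c))
      && decide (n ≤ (contexts.count p : Int)) with
    | true =>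
      simp only [reduceIte]
      rw [PySem.Dict.items_insert_of_not_contains r _ hcontains, hIH]
      obtain ⟨h1, h2⟩ := Bool.and_eq_true_iff.mp hc
      simp [hadm, h1, h2]
    | false =>
      simp only [Bool.false_eq_true, reduceIte]
      rw [hIH]
      rcases Bool.and_eq_false_iff.mp hc with h1 | h2
      · simp [hadm, h1]
      · simp [hadm, h2]

-- erasing a list of keys is one filter over the items
lemma pv_erase_foldl (ks : List String) : ∀ (d : PySem.Dict String Int),
    (ks.foldl (fun d k => d.erase k) d).items
      = d.items.filter (fun p => !ks.contains p.1) := by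
  induction ks with
  | nil => intro d; simp
  | cons k ks ih =>
    intro d
    simp only [List.foldl_cons]
    rw [ih]
    show ((PySem.Dict.erase d k).items.filter _) = _
    simp only [PySem.Dict.erase, List.filter_filter]
    apply List.filter_congr
    intro kv _
    simp only [List.contains_cons]
    by_cases hk : kv.1 = k
    · simp [hk]
    · have hb : (kv.1 == k) = false := by simpa using hk
      simp [hb]

-- two items of a nodup-keys dict with equal keys are equal
lemma pv_items_key_inj (d : PySem.Dict String Int) (hnd : d.keys.Nodup)
    {p q : String × Int} (hp : p ∈ d.items) (hq : q ∈ d.items) (hk : p.1 = q.1) : p = q := by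
  obtain ⟨k1, v1⟩ := p
  obtain ⟨k2, v2⟩ := q
  simp only at hk
  subst hk
  have e1 := PySem.Dict.get?_of_mem_items d hp hnd
  have e2 := PySem.Dict.get?_of_mem_items d hq hnd
  rw [e1] at e2
  simp only [Option.some.injEq] at e2
  rw [e2]

-- ===== VERDICT (by name: the statement is the Claim_ definition above) =====
theorem count_co_occurrence_num_spec : Claim_equal_count_co_occurrence_num := by
  intro contexts n wo co _ hpre
  unfold Spec_count_co_occurrence_num count_co_occurrence_num count_co_occurrence_num_alt
  dsimp only
  obtain ⟨h1, h3⟩ := pv_loop_inv wo co contexts PySem.Dict.empty PySem.Dict.empty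
    hpre (by simp) (by simp [PySem.Dict.empty])
  set dfa := contexts.foldl (pvStepA wo co) PySem.Dict.empty with hdfa
  set dcnt := contexts.foldl (fun d x => d.insert x (d.getD x 0 + 1))
    (PySem.Dict.empty : PySem.Dict String Int) with hdcnt
  have hndA : dfa.keys.Nodup := pv_nodup_of_filter dfa dcnt _ h1 h3
  -- A's delete pass is one filter by n ≤ v
  rw [show (dfa.items.foldl (fun acc kv => if decide (kv.2 < n) = true then acc ++ [kv.1] else acc)
        ([] : List String))
      = (dfa.items.filter (fun kv => decide (kv.2 < n))).map (fun kv => kv.1) by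
    simpa using PySem.List.foldl_append_if (fun kv : String × Int => decide (kv.2 < n))
      (fun kv => kv.1) dfa.items []]
  rw [pv_erase_foldl]
  have hA : dfa.items.filter
      (fun p => !((dfa.items.filter (fun kv => decide (kv.2 < n))).map (fun kv => kv.1)).contains p.1)
      = dfa.items.filter (fun p => decide (n ≤ p.2)) := by
    apply List.filter_congr
    intro kv hkv
    have hcc : ((dfa.items.filter (fun kv => decide (kv.2 < n))).map (fun kv => kv.1)).contains kv.1
        = decide (kv.2 < n) := by
      cases hlt : decide (kv.2 < n) with
      | true =>
        have hm : kv.1 ∈ (dfa.items.filter (fun kv => decide (kv.2 < n))).map (fun kv => kv.1) :=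
          List.mem_map.mpr ⟨kv, List.mem_filter.mpr ⟨hkv, hlt⟩, rfl⟩
        simp [List.contains_eq_mem, hm]
      | false =>
        have hm : kv.1 ∉ (dfa.items.filter (fun kv => decide (kv.2 < n))).map (fun kv => kv.1) := by
          intro hmem
          obtain ⟨q, hqmem, hqk⟩ := List.mem_map.mp hmem
          rw [List.mem_filter] at hqmem
          have heq := pv_items_key_inj dfa hndA hqmem.1 hkv hqk
          subst heq
          rw [hlt] at hqmem
          exact absurd hqmem.2 (by simp)
        simp [List.contains_eq_mem, hm]
    rw [hcc]
    cases h' : decide (kv.2 < n) with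
    | true =>
      have hv := of_decide_eq_true h'
      simp [decide_eq_false (by omega : ¬ n ≤ kv.2)]
    | false =>
      have hv := of_decide_eq_false h'
      simp [decide_eq_true (by omega : n ≤ kv.2)]
  rw [hA, h1]
  -- the unconditional counting loop is Counter(contexts)
  have hcounter : dcnt = PySem.Dict.counter contexts := by
    rw [hdcnt, PySem.Dict.foldl_insert_getD_add_one_eq_counter]
  rw [hcounter, PySem.Dict.items_counter]
  -- B's side: its loop runs over the distinct pairs of contexts
  rw [PySem.List.dedup_eq_ofList,
    pv_b_items contexts n wo co (PySem.Set.ofList contexts) (PySem.Set.nodup_ofList contexts)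
      (fun p hp => hpre p ((PySem.Set.mem_ofList contexts p).mp hp))]
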